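-- pv_equiv track=rewrite | github.com/Sqyzz/rag-pipeline | src/evaluation/qa_builder.py | _looks_like_noise_entity
-- ===== SOURCE A (Python) =====
-- def _looks_like_noise_entity(name: str) -> bool:
--     s = str(name or "").strip()
--     if not s:
--         return True
--     if len(s) > 72 and len(set(s)) <= 10:
--         return True
--     alnum = sum(ch.isalnum() for ch in s)
--     if alnum == 0:
--         return True
--     upper = sum(ch.isupper() for ch in s)
--     lower = sum(ch.islower() for ch in s)
--     digits = sum(ch.isdigit() for ch in s)
--     if len(s) >= 24 and upper >= 10 and lower <= 2 and digits <= 4: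
--         return True
--     if len(s) >= 24 and len(set(s)) <= 8:
--         return True
--     return False
-- ===== SOURCE B (Python) =====
-- def _looks_like_noise_entity(name: str) -> bool:
--     s = str(name or "").strip()
--     freq = {}
--     for ch in s:
--         freq[ch] = freq.get(ch, 0) + 1
--     n = len(s)
--     distinct = len(freq)
--     alnum = sum(c for ch, c in freq.items() if ch.isalnum())
--     upper = sum(c for ch, c in freq.items() if ch.isupper())
--     lower = sum(c for ch, c in freq.items() if ch.islower())
--     digits = sum(c for ch, c in freq.items() if ch.isdigit())
--     return (n == 0
--             or (n > 72 and distinct <= 10)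
--             or alnum == 0
--             or (n >= 24 and upper >= 10 and lower <= 2 and digits <= 4)
--             or (n >= 24 and distinct <= 8))
-- ===== Notes on version B (the rewrite author's own statement) =====
-- stated objective: alternative
-- what changed: B builds a character-frequency dictionary in one pass and derives every statistic from the histogram (distinct = len(freq); alnum/upper/lower/digit counts as weighted sums over the at most ~98 distinct characters), then returns one boolean expression, replacing A's four per-character sum() scans, two set(s) rebuilds and early-return guard chain.
import Mathlib
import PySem

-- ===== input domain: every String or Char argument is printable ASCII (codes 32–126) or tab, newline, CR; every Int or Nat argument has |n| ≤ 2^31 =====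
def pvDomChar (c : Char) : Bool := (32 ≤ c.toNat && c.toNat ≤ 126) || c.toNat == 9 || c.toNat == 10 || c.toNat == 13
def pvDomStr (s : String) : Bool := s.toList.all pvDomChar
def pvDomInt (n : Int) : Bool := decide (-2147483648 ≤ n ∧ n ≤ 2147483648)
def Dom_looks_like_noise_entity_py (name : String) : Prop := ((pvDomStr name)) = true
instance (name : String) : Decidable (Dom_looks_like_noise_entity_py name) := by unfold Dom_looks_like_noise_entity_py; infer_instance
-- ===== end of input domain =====

-- B replaces A's four per-character sum() scans, two set(s) rebuilds and early-return chain by ONE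
-- frequency histogram built once, statistics derived from the histogram's items, and one boolean expression.

-- ===== PORT A =====
-- literal transliteration: strip, early empty-return, then separate sum-scans and set rebuilds
def looks_like_noise_entity_py (name : String) : Bool :=
  let s := PySem.Chars.strip name.toList
  if s.length = 0 then true
  else if s.length > 72 ∧ (PySem.Set.ofList s).length ≤ 10 then true
  else
    let alnum : Int := (s.map (fun ch => if PySem.Chars.isalnum ch then (1 : Int) else 0)).sum
    if alnum = 0 then true
    else
      let upper : Int := (s.map (fun ch => if PySem.Chars.isupper ch then (1 : Int) else 0)).sum
      let lower : Int := (s.map (fun ch => if PySem.Chars.islower ch then (1 : Int) else 0)).sum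
      let digits : Int := (s.map (fun ch => if PySem.Chars.isdigit ch then (1 : Int) else 0)).sum
      if s.length ≥ 24 ∧ upper ≥ 10 ∧ lower ≤ 2 ∧ digits ≤ 4 then true
      else if s.length ≥ 24 ∧ (PySem.Set.ofList s).length ≤ 8 then true
      else false

-- ===== PORT B =====
-- sum(c for ch, c in freq.items() if pred(ch))
def pvItemsSum (items : List (Char × Int)) (pred : Char → Bool) : Int :=
  ((items.filter (fun p => pred p.1)).map (fun p => p.2)).sum

def looks_like_noise_entity_py_alt (name : String) : Bool :=
  let s := PySem.Chars.strip name.toList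
  let freq := s.foldl (fun d ch => d.insert ch (d.getD ch 0 + 1)) PySem.Dict.empty
  let n := s.length
  let distinct := freq.size
  let alnum := pvItemsSum freq.items PySem.Chars.isalnum
  let upper := pvItemsSum freq.items PySem.Chars.isupper
  let lower := pvItemsSum freq.items PySem.Chars.islower
  let digits := pvItemsSum freq.items PySem.Chars.isdigit
  decide (n = 0)
    || (decide (n > 72) && decide (distinct ≤ 10))
    || decide (alnum = 0)
    || (decide (n ≥ 24) && decide (upper ≥ 10) && decide (lower ≤ 2) && decide (digits ≤ 4))
    || (decide (n ≥ 24) && decide (distinct ≤ 8))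

-- ===== PRECONDITION & SPEC =====
def Spec_looks_like_noise_entity_py (name : String) (out : Bool) : Prop := out = looks_like_noise_entity_py_alt name
instance (name : String) (out : Bool) : Decidable (Spec_looks_like_noise_entity_py name out) := by unfold Spec_looks_like_noise_entity_py; infer_instance

-- ===== CLAIM (what is proved, stated in full; the proofs are below) =====
def Claim_equal_looks_like_noise_entity_py : Prop := ∀ (name : String), Dom_looks_like_noise_entity_py name → Spec_looks_like_noise_entity_py name (looks_like_noise_entity_py name)

-- ===== LEMMAS AND PROOFS =====

-- sum of an equality indicator over a duplicate-free list is a membership indicator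
theorem pvSumIndicator (x : Char) (u : List Char) (hu : u.Nodup) :
    (u.map (fun k => if x = k then (1 : Int) else 0)).sum = if x ∈ u then 1 else 0 := by
  induction u with
  | nil => simp
  | cons a t ih =>
      simp only [List.nodup_cons] at hu
      simp only [List.map_cons, List.sum_cons, ih hu.2, List.mem_cons]
      by_cases hxa : x = a <;> simp_all

-- the histogram sum over a nodup key list counts the occurrences in s whose char is in u and satisfies pred
theorem pvHistSum (pred : Char → Bool) (s u : List Char) (hu : u.Nodup) :
    ((u.filter pred).map (fun k => (s.count k : Int))).sum
      = ((s.filter (fun x => decide (x ∈ u) && pred x)).length : Int) := by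
  induction s with
  | nil => simp
  | cons x t ih =>
      have hcount : ∀ k : Char, ((x :: t).count k : Int)
          = (t.count k : Int) + (if x = k then 1 else 0) := by
        intro k
        by_cases hxk : x = k <;> simp [hxk]
      have hmapeq : ((u.filter pred).map (fun k => ((x :: t).count k : Int)))
          = ((u.filter pred).map (fun k => (t.count k : Int) + (if x = k then 1 else 0))) := by
        exact List.map_congr_left (fun k _ => hcount k)
      rw [hmapeq]
      rw [PySem.List.sum_map_add_int]
      rw [ih, pvSumIndicator x (u.filter pred) (hu.filter pred)]
      by_cases hxu : x ∈ u <;> by_cases hpx : pred x = true <;>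
        simp [hxu, hpx, List.mem_filter]

-- the histogram sum over the distinct chars of s is exactly countP pred s
theorem pvHistSum_ofList (pred : Char → Bool) (s : List Char) :
    (((PySem.Set.ofList s).filter pred).map (fun k => (s.count k : Int))).sum
      = (s.countP pred : Int) := by
  rw [pvHistSum pred s (PySem.Set.ofList s) (PySem.Set.nodup_ofList s)]
  have : s.filter (fun x => decide (x ∈ PySem.Set.ofList s) && pred x) = s.filter pred := by
    apply List.filter_congr
    intro x hx
    simp [PySem.Set.mem_ofList, hx]
  rw [this, List.countP_eq_length_filter]

-- pvItemsSum over the counter's items IS countP over s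
theorem pvItemsSum_counter (pred : Char → Bool) (s : List Char) :
    pvItemsSum (PySem.Dict.counter s).items pred = (s.countP pred : Int) := by
  unfold pvItemsSum
  rw [PySem.Dict.items_counter]
  rw [List.filter_map, List.map_map]
  simp only [Function.comp_def]
  exact pvHistSum_ofList pred s

-- ===== VERDICT (by name: the statement is the Claim_ definition above) =====
theorem looks_like_noise_entity_py_spec : Claim_equal_looks_like_noise_entity_py := by
  intro name _
  unfold Spec_looks_like_noise_entity_py looks_like_noise_entity_py looks_like_noise_entity_py_alt
  simp only [PySem.Dict.foldl_insert_getD_add_one_eq_counter,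
    pvItemsSum_counter, PySem.List.sum_map_ite_one_zero]
  simp only [PySem.Dict.size, PySem.Dict.items_counter, List.length_map]
  split_ifs <;> simp_all
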